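-- pv_equiv track=rewrite | github.com/samaresh77/09.09.2025 | Python/Projects/Number Pattern/main.py | fibonacci_triangle
-- ===== SOURCE A (Python) =====
-- def fibonacci_triangle(n):
--     pattern = ""
--     a, b = 0, 1
--     for i in range(1, n+1):
--         line = ""
--         for j in range(i):
--             line += str(b) + " "
--             a, b = b, a + b
--         pattern += line.strip() + "\n"
--     return pattern
-- ===== SOURCE B (Python) =====
-- def fibonacci_triangle(n):
--     # Phase 1: generate the flat run of consecutive Fibonacci values (b starts at 1).
--     total = n * (n + 1) // 2 if n > 0 else 0
--     fibs = []
--     a, b = 0, 1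
--     for _ in range(total):
--         fibs.append(b)
--         a, b = b, a + b
--     # Phase 2: partition the flat list into rows of growing length.
--     rows = []
--     offset = 0
--     for i in range(1, n + 1):
--         rows.append(' '.join(str(x) for x in fibs[offset:offset + i]))
--         offset += i
--     return ''.join(r + '\n' for r in rows)
-- ===== Notes on version B (the rewrite author's own statement) =====
-- stated objective: alternative
-- what changed: B separates generation from formatting: it first computes the triangular total count and builds a flat list of consecutive Fibonacci values in one pass, then slices that list into rows by cumulative offsets and joins each row with a space join, instead of A's nested loops that build each line by string concatenation plus strip.
import Mathlib
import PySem

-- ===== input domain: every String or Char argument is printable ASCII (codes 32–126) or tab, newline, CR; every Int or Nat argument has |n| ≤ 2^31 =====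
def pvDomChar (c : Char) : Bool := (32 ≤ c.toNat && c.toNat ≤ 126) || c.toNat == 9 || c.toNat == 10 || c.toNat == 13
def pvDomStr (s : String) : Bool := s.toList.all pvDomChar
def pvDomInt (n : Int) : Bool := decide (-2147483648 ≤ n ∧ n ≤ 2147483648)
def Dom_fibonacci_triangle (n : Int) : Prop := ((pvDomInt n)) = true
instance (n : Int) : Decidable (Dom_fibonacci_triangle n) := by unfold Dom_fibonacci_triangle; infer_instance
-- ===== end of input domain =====

-- B separates Fibonacci-sequence generation (one flat pass) from row formatting
-- (slices + ' '.join), instead of A's nested loops with string concatenation + strip;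
-- same asymptotic cost (objective: alternative).

-- ===== PORT A =====
def innerStepA (st : String × Int × Int) (_j : Int) : String × Int × Int :=
  (st.1 ++ PySem.Int.toStr st.2.2 ++ " ", st.2.2, st.2.1 + st.2.2)

def outerStepA (st : String × Int × Int) (i : Int) : String × Int × Int :=
  let inner := (PySem.List.pyRange 0 i 1).foldl innerStepA ("", st.2.1, st.2.2)
  (st.1 ++ PySem.Str.strip inner.1 ++ "\n", inner.2)

def fibonacci_triangle (n : Int) : String :=
  ((PySem.List.pyRange 1 (n + 1) 1).foldl outerStepA ("", 0, 1)).1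

-- ===== PORT B =====
def genStepB (st : List Int × Int × Int) (_j : Int) : List Int × Int × Int :=
  (st.1 ++ [st.2.2], st.2.2, st.2.1 + st.2.2)

def rowStepB (fibs : List Int) (st : List String × Int) (i : Int) : List String × Int :=
  (st.1 ++ [PySem.Str.join " " ((PySem.List.slice fibs (some st.2) (some (st.2 + i))).map PySem.Int.toStr)],
   st.2 + i)

def fibonacci_triangle_alt (n : Int) : String :=
  let total : Int := if 0 < n then PySem.Int.floordiv (n * (n + 1)) 2 else 0
  let gen := (PySem.List.pyRange 0 total 1).foldl genStepB ([], 0, 1)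
  let rows := (PySem.List.pyRange 1 (n + 1) 1).foldl (rowStepB gen.1) ([], 0)
  PySem.Str.join "" (rows.1.map (fun r => r ++ "\n"))

-- ===== PRECONDITION & SPEC =====
def Spec_fibonacci_triangle (n : Int) (out : String) : Prop := out = fibonacci_triangle_alt n
instance (n : Int) (out : String) : Decidable (Spec_fibonacci_triangle n out) := by unfold Spec_fibonacci_triangle; infer_instance

-- ===== CLAIM (what is proved, stated in full; the proofs are below) =====
def Claim_equal_fibonacci_triangle : Prop := ∀ (n : Int), Dom_fibonacci_triangle n → Spec_fibonacci_triangle n (fibonacci_triangle n)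

-- ===== LEMMAS AND PROOFS =====

/-- The running Fibonacci pair: `fibPair k` is `(a, b)` after `k` steps of `a, b = b, a+b` from `(0, 1)`. -/
def fibPair : Nat → Int × Int
  | 0 => (0, 1)
  | k + 1 => ((fibPair k).2, (fibPair k).1 + (fibPair k).2)

def fv (k : Nat) : Int := (fibPair k).2

/-- Triangular numbers, recursively. -/
def tri : Nat → Nat
  | 0 => 0
  | t + 1 => tri t + (t + 1)

def tok (k : Nat) : List Char := PySem.Int.toChars (fv k)

def rowChars (o i : Nat) : List Char := List.intercalate [' '] ((List.range' o i).map tok)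

def canon (t : Nat) : List Char :=
  ((List.range t).map (fun r => rowChars (tri r) (r + 1) ++ ['\n'])).flatten

lemma fibPair_pos : ∀ k, 0 ≤ (fibPair k).1 ∧ 1 ≤ (fibPair k).2 := by
  intro k
  induction k with
  | zero => simp [fibPair]
  | succ k ih => simp [fibPair]; omega

lemma fv_pos (k : Nat) : 1 ≤ fv k := (fibPair_pos k).2

lemma tri_two (t : Nat) : 2 * tri t = t * (t + 1) := by
  induction t with
  | zero => simp [tri]
  | succ t ih => simp [tri]; ring_nf; ring_nf at ih; omega

lemma tri_mono {a b : Nat} (h : a ≤ b) : tri a ≤ tri b := by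
  induction b with
  | zero =>
    have : a = 0 := by omega
    simp [this]
  | succ b ih =>
    by_cases h' : a ≤ b
    · have := ih h'
      simp only [tri]
      omega
    · have : a = b + 1 := by omega
      simp [this]

-- characters of str(m) for m ≥ 1 are never whitespace, and str(m) is nonempty
lemma toDigitsCore_nonspace : ∀ (fuel n : Nat) (acc : List Char),
    (∀ c ∈ acc, PySem.Chars.isspace c = false) →
    ∀ c ∈ Nat.toDigitsCore 10 fuel n acc, PySem.Chars.isspace c = false := by
  intro fuel
  induction fuel with
  | zero => intro n acc hacc c hc; simp [Nat.toDigitsCore] at hc; exact hacc c hc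
  | succ fuel ih =>
    intro n acc hacc c hc
    have hd : PySem.Chars.isspace (Nat.digitChar (n % 10)) = false := by
      have h10 : n % 10 < 10 := Nat.mod_lt _ (by norm_num)
      set m := n % 10 with hm
      interval_cases m <;> decide
    simp [Nat.toDigitsCore] at hc
    split at hc
    · rcases List.mem_cons.mp hc with rfl | hc'
      · exact hd
      · exact hacc c hc'
    · refine ih _ _ ?_ c hc
      intro c' hc'
      rcases List.mem_cons.mp hc' with rfl | hc''
      · exact hd
      · exact hacc c' hc''

lemma toDigitsCore_ne_nil : ∀ (fuel n : Nat) (acc : List Char),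
    (1 ≤ fuel ∨ acc ≠ []) → Nat.toDigitsCore 10 fuel n acc ≠ [] := by
  intro fuel
  induction fuel with
  | zero => intro n acc h; simp [Nat.toDigitsCore]; tauto
  | succ fuel ih =>
    intro n acc _
    simp [Nat.toDigitsCore]
    split
    · simp
    · exact ih _ _ (Or.inr (by simp))

lemma tok_nonspace (k : Nat) : ∀ c ∈ tok k, PySem.Chars.isspace c = false := by
  have h1 := fv_pos k
  intro c hc
  unfold tok PySem.Int.toChars at hc
  rw [if_neg (by omega)] at hc
  exact toDigitsCore_nonspace _ _ _ (by simp) c hc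

lemma tok_ne_nil (k : Nat) : tok k ≠ [] := by
  have h1 := fv_pos k
  unfold tok PySem.Int.toChars
  rw [if_neg (by omega)]
  unfold Nat.toDigits
  exact toDigitsCore_ne_nil _ _ _ (Or.inl (by omega))

-- intercalate with nonempty, nonspace tokens: head/last are nonspace, and it is nonempty
lemma inter_props : ∀ (toks : List (List Char)), toks ≠ [] →
    (∀ t ∈ toks, t ≠ [] ∧ ∀ c ∈ t, PySem.Chars.isspace c = false) →
    (∀ c, (List.intercalate [' '] toks).head? = some c → PySem.Chars.isspace c = false) ∧
    (∀ c, (List.intercalate [' '] toks).getLast? = some c → PySem.Chars.isspace c = false) ∧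
    List.intercalate [' '] toks ≠ [] := by
  intro toks
  induction toks with
  | nil => intro h; exact absurd rfl h
  | cons t ts ih =>
    intro _ hprops
    rcases hprops t (by simp) with ⟨htne, htns⟩
    cases ts with
    | nil =>
      have he : List.intercalate [' '] [t] = t := by simp [List.intercalate]
      rw [he]
      refine ⟨?_, ?_, htne⟩
      · intro c hc; exact htns c (List.mem_of_mem_head? (by simp [hc]))
      · intro c hc
        exact htns c (List.mem_of_getLast? hc)
    | cons t' ts' =>
      rcases ih (by simp) (by intro x hx; exact hprops x (by simp [hx])) with ⟨ihh, ihl, ihne⟩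
      have hjoin : List.intercalate [' '] (t :: t' :: ts') = t ++ [' '] ++ List.intercalate [' '] (t' :: ts') :=
        PySem.Chars.join_cons_cons [' '] t t' ts'
      rw [hjoin]
      refine ⟨?_, ?_, by simp [htne]⟩
      · intro c hc
        rw [List.head?_append, List.head?_append] at hc
        rcases List.exists_cons_of_ne_nil htne with ⟨a, rest, rfl⟩
        simp only [List.head?_cons, Option.some_or] at hc
        injection hc with hc
        exact htns c (by rw [← hc]; simp)
      · intro c hc
        rw [List.getLast?_append] at hc
        obtain ⟨d, hd⟩ : ∃ d, (List.intercalate [' '] (t' :: ts')).getLast? = some d :=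
          Option.ne_none_iff_exists'.mp (fun h => ihne (List.getLast?_eq_none_iff.mp h))
        rw [hd, Option.some_or] at hc
        injection hc with hc
        exact hc ▸ ihl d hd

lemma flatten_sep : ∀ (toks : List (List Char)), toks ≠ [] →
    (toks.map (· ++ [' '])).flatten = List.intercalate [' '] toks ++ [' '] := by
  intro toks
  induction toks with
  | nil => intro h; exact absurd rfl h
  | cons t ts ih =>
    intro _
    cases ts with
    | nil => simp [List.intercalate]
    | cons t' ts' =>
      have hrec := ih (by simp)
      have hj : List.intercalate [' '] (t :: t' :: ts') = t ++ [' '] ++ List.intercalate [' '] (t' :: ts') :=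
        PySem.Chars.join_cons_cons [' '] t t' ts'
      rw [hj]
      simp only [List.map_cons, List.flatten_cons] at hrec ⊢
      rw [hrec]
      simp

lemma strip_sandwich (L : List Char)
    (h1 : ∀ c, L.head? = some c → PySem.Chars.isspace c = false)
    (h2 : ∀ c, L.getLast? = some c → PySem.Chars.isspace c = false)
    (hne : L ≠ []) :
    PySem.Chars.strip (L ++ [' ']) = L := by
  rcases List.exists_cons_of_ne_nil hne with ⟨a, rest, rfl⟩
  unfold PySem.Chars.strip PySem.Chars.lstrip PySem.Chars.rstrip
  have ha : PySem.Chars.isspace a = false := h1 a (by simp)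
  rw [List.cons_append, List.dropWhile_cons, if_neg (by simp [ha])]
  rw [show (a :: (rest ++ [' '])).reverse = ' ' :: (a :: rest).reverse by simp]
  rw [List.dropWhile_cons, if_pos (by decide)]
  rcases List.exists_cons_of_ne_nil (l := (a :: rest).reverse) (by simp) with ⟨d, rev, hrev⟩
  have hd : PySem.Chars.isspace d = false := by
    apply h2
    rw [← List.head?_reverse, hrev]
    simp
  rw [hrev, List.dropWhile_cons, if_neg (by simp [hd]), ← hrev]
  simp

-- the strip of A's line equals B's join
lemma strip_row (k m : Nat) (hm : 1 ≤ m) :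
    PySem.Chars.strip (((List.range' k m).map (fun j => tok j ++ [' '])).flatten) = rowChars k m := by
  have htoks : ((List.range' k m).map tok) ≠ [] := by
    simp [List.range'_eq_nil_iff]; omega
  have hprops : ∀ t ∈ (List.range' k m).map tok, t ≠ [] ∧ ∀ c ∈ t, PySem.Chars.isspace c = false := by
    intro t ht
    rcases List.mem_map.mp ht with ⟨j, _, rfl⟩
    exact ⟨tok_ne_nil j, tok_nonspace j⟩
  rcases inter_props _ htoks hprops with ⟨hh, hl, hn⟩
  have : ((List.range' k m).map (fun j => tok j ++ [' '])).flatten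
      = List.intercalate [' '] ((List.range' k m).map tok) ++ [' '] := by
    rw [show (List.range' k m).map (fun j => tok j ++ [' ']) = ((List.range' k m).map tok).map (· ++ [' ']) by
      simp [List.map_map]]
    exact flatten_sep _ htoks
  rw [this, strip_sandwich _ hh hl hn]
  rfl

-- ===== A-side loop characterisation =====
lemma innerA_spec (m : Nat) : ∀ (s : String) (k : Nat),
    ((PySem.List.pyRange 0 (m : Int) 1).foldl innerStepA (s, fibPair k)).2 = fibPair (k + m) ∧
    ((PySem.List.pyRange 0 (m : Int) 1).foldl innerStepA (s, fibPair k)).1.toList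
      = s.toList ++ ((List.range' k m).map (fun j => tok j ++ [' '])).flatten := by
  induction m with
  | zero =>
    intro s k
    rw [show ((0 : Nat) : Int) = 0 by norm_num, PySem.List.pyRange_one_eq_nil (by omega)]
    simp
  | succ m ih =>
    intro s k
    rw [show ((m + 1 : Nat) : Int) = (m : Int) + 1 by push_cast; ring,
        PySem.List.pyRange_one_succ_right (by positivity), List.foldl_append]
    obtain ⟨ih2, ih1⟩ := ih s k
    set R := (PySem.List.pyRange 0 (m : Int) 1).foldl innerStepA (s, fibPair k) with hR
    simp only [List.foldl_cons, List.foldl_nil]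
    have hstep : innerStepA R (m : Int)
        = (R.1 ++ PySem.Int.toStr R.2.2 ++ " ", fibPair (k + m + 1)) := by
      unfold innerStepA
      have : fibPair (k + m + 1) = ((fibPair (k + m)).2, (fibPair (k + m)).1 + (fibPair (k + m)).2) := rfl
      rw [this, ← ih2]
    rw [hstep]
    constructor
    · simp [Nat.add_assoc]
    · simp only [String.toList_append, ih1, ih2]
      rw [List.range'_concat (s := k) (n := m)]
      simp [tok, fv, PySem.Int.toList_toStr]

lemma outerA_spec (t : Nat) :
    ((PySem.List.pyRange 1 ((t : Int) + 1) 1).foldl outerStepA ("", 0, 1)).2 = fibPair (tri t) ∧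
    ((PySem.List.pyRange 1 ((t : Int) + 1) 1).foldl outerStepA ("", 0, 1)).1.toList = canon t := by
  induction t with
  | zero =>
    rw [show ((0 : Nat) : Int) + 1 = 1 by norm_num, PySem.List.pyRange_one_eq_nil (by omega)]
    exact ⟨rfl, rfl⟩
  | succ t ih =>
    rw [show ((t + 1 : Nat) : Int) + 1 = ((t : Int) + 1) + 1 by push_cast; ring,
        PySem.List.pyRange_one_succ_right (by omega), List.foldl_append]
    obtain ⟨ih2, ih1⟩ := ih
    set R := (PySem.List.pyRange 1 ((t : Int) + 1) 1).foldl outerStepA ("", 0, 1) with hR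
    simp only [List.foldl_cons, List.foldl_nil]
    unfold outerStepA
    have hpair : (("" : String), R.2.1, R.2.2) = (("" : String), fibPair (tri t)) := by rw [← ih2]
    rw [hpair,
        show (t : Int) + 1 = ((t + 1 : Nat) : Int) by push_cast; ring]
    obtain ⟨hin2, hin1⟩ := innerA_spec (t + 1) "" (tri t)
    constructor
    · simp only [hin2]
      rfl
    · simp only [String.toList_append, ih1, PySem.Str.toList_strip, hin1]
      have : PySem.Chars.strip ((List.map (fun j => tok j ++ [' ']) (List.range' (tri t) (t + 1))).flatten)
          = rowChars (tri t) (t + 1) := strip_row _ _ (by omega)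
      rw [show ("".toList ++ (List.map (fun j => tok j ++ [' ']) (List.range' (tri t) (t + 1))).flatten)
            = (List.map (fun j => tok j ++ [' ']) (List.range' (tri t) (t + 1))).flatten by simp,
          this]
      unfold canon
      rw [List.range_succ]
      simp

-- ===== B-side loop characterisation =====
lemma genB_spec (m : Nat) : ∀ (s : List Int) (k : Nat),
    (PySem.List.pyRange 0 (m : Int) 1).foldl genStepB (s, fibPair k)
      = (s ++ (List.range' k m).map fv, fibPair (k + m)) := by
  induction m with
  | zero =>
    intro s k
    rw [show ((0 : Nat) : Int) = 0 by norm_num, PySem.List.pyRange_one_eq_nil (by omega)]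
    simp
  | succ m ih =>
    intro s k
    rw [show ((m + 1 : Nat) : Int) = (m : Int) + 1 by push_cast; ring,
        PySem.List.pyRange_one_succ_right (by positivity), List.foldl_append, ih s k]
    simp only [List.foldl_cons, List.foldl_nil]
    have hfp : fibPair (k + (m + 1)) = ((fibPair (k + m)).2, (fibPair (k + m)).1 + (fibPair (k + m)).2) := rfl
    rw [List.range'_concat (s := k) (n := m)]
    simp [genStepB, fv, hfp]

def rowStr (r : Nat) : String :=
  PySem.Str.join " " (((List.range' (tri r) (r + 1)).map fv).map PySem.Int.toStr)

lemma rowStr_toList (r : Nat) : (rowStr r).toList = rowChars (tri r) (r + 1) := by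
  unfold rowStr rowChars
  rw [PySem.Str.toList_join]
  congr 1
  simp [List.map_map, Function.comp, PySem.Int.toList_toStr, tok]

lemma rowsB_spec (N : Nat) (t : Nat) (ht : t ≤ N) :
    ((PySem.List.pyRange 1 ((t : Int) + 1) 1).foldl (rowStepB ((List.range' 0 (tri N)).map fv)) ([], 0))
      = ((List.range t).map rowStr, (tri t : Int)) := by
  induction t with
  | zero =>
    rw [show ((0 : Nat) : Int) + 1 = 1 by norm_num, PySem.List.pyRange_one_eq_nil (by omega)]
    simp [tri]
  | succ t ih =>
    rw [show ((t + 1 : Nat) : Int) + 1 = ((t : Int) + 1) + 1 by push_cast; ring,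
        PySem.List.pyRange_one_succ_right (by omega), List.foldl_append, ih (by omega)]
    simp only [List.foldl_cons, List.foldl_nil]
    unfold rowStepB
    have hslice : PySem.List.slice ((List.range' 0 (tri N)).map fv) (some (tri t : Int))
          (some ((tri t : Int) + ((t : Int) + 1)))
        = (List.range' (tri t) (t + 1)).map fv := by
      rw [show (tri t : Int) + ((t : Int) + 1) = (tri t : Int) + ((t + 1 : Nat) : Int) by push_cast; ring,
          PySem.List.slice_natCast_add]
      have hsplit : tri N = tri t + ((t + 1) + (tri N - tri (t + 1))) := by
        have h1 : tri (t + 1) ≤ tri N := tri_mono ht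
        simp only [tri] at h1 ⊢
        omega
      rw [← List.map_drop, ← List.map_take]
      congr 1
      rw [hsplit, ← List.range'_append (s := 0) (m := tri t), List.drop_left']
      · simp only [Nat.zero_add, Nat.one_mul]
        rw [← List.range'_append (s := tri t) (m := t + 1)]
        exact List.take_left' (List.length_range' ..)
      · exact List.length_range' ..
    rw [hslice]
    simp only [Prod.mk.injEq]
    constructor
    · rw [List.range_succ]
      simp [rowStr]
    · simp only [tri]
      push_cast
      ring

lemma join_empty_sep (L : List (List Char)) : PySem.Chars.join [] L = L.flatten := by
  induction L with
  | nil => simp [PySem.Chars.join, List.intercalate]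
  | cons t ts ih =>
    cases ts with
    | nil => simp [PySem.Chars.join, List.intercalate]
    | cons t' ts' =>
      rw [PySem.Chars.join_cons_cons]
      simp only [List.flatten_cons]
      rw [ih]
      simp

-- ===== VERDICT (by name: the statement is the Claim_ definition above) =====
theorem fibonacci_triangle_spec : Claim_equal_fibonacci_triangle := by
  intro n _
  unfold Spec_fibonacci_triangle
  simp only [fibonacci_triangle, fibonacci_triangle_alt]
  by_cases hn : 0 < n
  · set t := n.toNat with hdef
    have hnt : n = (t : Int) := by omega
    rw [hnt] at hn ⊢
    have htot : (if 0 < (t : Int) then PySem.Int.floordiv ((t : Int) * ((t : Int) + 1)) 2 else 0)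
        = ((tri t : Nat) : Int) := by
      rw [if_pos hn]
      have h2 : (t : Int) * ((t : Int) + 1) = 2 * ((tri t : Nat) : Int) := by
        have h := tri_two t
        have hc : ((2 * tri t : Nat) : Int) = ((t * (t + 1) : Nat) : Int) := Nat.cast_inj.mpr h
        push_cast at hc
        linarith [hc]
      rw [h2]
      unfold PySem.Int.floordiv
      exact Int.mul_fdiv_cancel_left _ (by norm_num)
    rw [← String.toList_inj, (outerA_spec t).2]
    rw [htot]
    have hgen : (PySem.List.pyRange 0 ((tri t : Nat) : Int) 1).foldl genStepB ([], 0, 1)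
        = ((List.range' 0 (tri t)).map fv, fibPair (tri t)) := by
      have h := genB_spec (tri t) [] 0
      simpa using h
    rw [hgen]
    have hrows := rowsB_spec t t (le_refl t)
    rw [hrows]
    rw [PySem.Str.toList_join, show ("" : String).toList = ([] : List Char) from rfl, join_empty_sep]
    unfold canon
    rw [List.map_map, List.map_map]
    congr 1
    apply List.map_congr_left
    intro r _
    simp only [Function.comp_apply, String.toList_append, rowStr_toList]
    congr 1
  · rw [PySem.List.pyRange_one_eq_nil (by omega : n + 1 ≤ 1), if_neg hn,
        PySem.List.pyRange_one_eq_nil (by omega : (0 : Int) ≤ 0)]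
    simp only [List.foldl_nil, List.map_nil]
    rw [← String.toList_inj, PySem.Str.toList_join]
    simp [PySem.Chars.join, List.intercalate]
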